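-- pv_equiv track=rewrite | github.com/vidhi0206/entity_summ | compile_ngram.py | convert_triples_to_dict
-- ===== SOURCE A (Python) =====
-- def parse_triple(triple: str) -> tuple[str, str, str]:
--     triple = triple.strip(" .")  # Remove trailing space and dot
--     subject, predicate, obj = triple.split(" ", 2)  # Split into three parts
--     return subject.strip("<>"), predicate.strip("<>"), obj.strip("<>")
--
-- def convert_triples_to_dict(
--     triples: list[str],
-- ) -> dict[str, list[tuple[str, str, str]]]:  # convert the triple into dictionary format
--     result = {}
--     for triple in triples:
--         subject, predicate, obj = parse_triple(triple)
--         if subject not in result: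
--             result[subject] = []
--         result[subject].append((subject, predicate, obj))
--     return result
-- ===== SOURCE B (Python) =====
-- def parse_triple(triple: str) -> tuple[str, str, str]:
--     triple = triple.strip(" .")
--     subject, predicate, obj = triple.split(" ", 2)
--     return subject.strip("<>"), predicate.strip("<>"), obj.strip("<>")
--
-- def convert_triples_to_dict(triples):
--     parsed = [parse_triple(t) for t in triples]
--     subjects = list(dict.fromkeys(p[0] for p in parsed))
--     return {s: [p for p in parsed if p[0] == s] for s in subjects}
-- ===== Notes on version B (the rewrite author's own statement) =====
-- stated objective: alternative
-- what changed: Replaces the incremental build-a-dict-while-iterating grouping with a two-pass scheme: parse everything once, dedup the subjects in first-occurrence order, then emit each group by filtering the parsed list per subject (dict comprehension).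
import Mathlib
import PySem

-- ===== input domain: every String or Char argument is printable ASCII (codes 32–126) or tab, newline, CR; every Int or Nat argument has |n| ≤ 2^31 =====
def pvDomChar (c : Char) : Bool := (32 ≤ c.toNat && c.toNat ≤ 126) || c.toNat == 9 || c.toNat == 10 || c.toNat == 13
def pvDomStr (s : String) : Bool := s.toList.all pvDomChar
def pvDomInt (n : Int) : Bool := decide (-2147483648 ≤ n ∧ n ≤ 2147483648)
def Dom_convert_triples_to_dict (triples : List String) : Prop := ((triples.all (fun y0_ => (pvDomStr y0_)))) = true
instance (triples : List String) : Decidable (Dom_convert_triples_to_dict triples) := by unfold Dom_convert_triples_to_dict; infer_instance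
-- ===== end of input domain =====

-- B replaces A's incremental build-a-dict-while-iterating grouping by a two-pass scheme
-- (parse all, dedup subjects in first-occurrence order, then filter the parsed list per
-- subject); objective: alternative decomposition, not claimed faster.

-- ===== PORT A =====
-- parse_triple; returns none exactly where the Python tuple-unpacking raises ValueError
-- (fewer than three parts after the strip/split).
def parse_triple? (triple : String) : Option (String × String × String) :=
  let t := PySem.Str.stripChars triple " ."
  match PySem.Str.splitMax? t " " 2 with
  | some [s, p, o] =>
      some (PySem.Str.stripChars s "<>", PySem.Str.stripChars p "<>", PySem.Str.stripChars o "<>")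
  | _ => none

def convert_triples_to_dict (triples : List String) : List (String × List (String × String × String)) :=
  (triples.foldl
    (fun result triple =>
      match parse_triple? triple with
      | some p =>
          let result := if result.contains p.1 then result else result.insert p.1 []
          result.modify p.1 [] (fun v => v ++ [p])
      | none => result)
    PySem.Dict.empty).items

-- ===== PORT B =====
def convert_triples_to_dict_alt (triples : List String) : List (String × List (String × String × String)) :=
  let parsed := triples.filterMap parse_triple?
  let subjects := PySem.List.dedup (parsed.map (·.1))
  subjects.map (fun s => (s, parsed.filter (fun p => p.1 == s)))

-- ===== PRECONDITION & SPEC =====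
-- Pre_ excludes exactly the inputs where A raises ValueError: a triple whose stripped form
-- has fewer than two spaces cannot be unpacked into three parts.
def Pre_convert_triples_to_dict (triples : List String) : Prop :=
  ∀ t ∈ triples, 2 ≤ PySem.Str.count (PySem.Str.stripChars t " .") " "
instance (triples : List String) : Decidable (Pre_convert_triples_to_dict triples) := by
  unfold Pre_convert_triples_to_dict; infer_instance

def pvWitness_convert_triples_to_dict : List String :=
  ["<s> <p> <o> .", "<s> <q> hello world .", "<t> <p> <o>"]

def Spec_convert_triples_to_dict (triples : List String) (out : List (String × List (String × String × String))) : Prop := out = convert_triples_to_dict_alt triples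
instance (triples : List String) (out : List (String × List (String × String × String))) : Decidable (Spec_convert_triples_to_dict triples out) := by unfold Spec_convert_triples_to_dict; infer_instance

-- ===== CLAIM (what is proved, stated in full; the proofs are below) =====
def Claim_equal_convert_triples_to_dict : Prop := ∀ (triples : List String), Dom_convert_triples_to_dict triples → Pre_convert_triples_to_dict triples → Spec_convert_triples_to_dict triples (convert_triples_to_dict triples)

-- ===== LEMMAS AND PROOFS =====

theorem lookup_none_of_fresh (items : List (String × List (String × String × String)))
    (k : String) (h : (items.any fun kv => kv.1 == k) = false) :
    (PySem.Dict.mk items).get? k = none := by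
  induction items with
  | nil => simp [PySem.Dict.get?]
  | cons q rest ih =>
      obtain ⟨a, b⟩ := q
      rw [PySem.Dict.get?_mk_cons]
      simp only [List.any_cons, Bool.or_eq_false_iff] at h
      simp [h.1, ih h.2]

theorem get?_append_fresh (items : List (String × List (String × String × String)))
    (k : String) (v : List (String × String × String))
    (h : (items.any fun kv => kv.1 == k) = false) :
    (PySem.Dict.mk (items ++ [(k, v)])).get? k = some v := by
  induction items with
  | nil => rw [List.nil_append, PySem.Dict.get?_mk_cons]; simp
  | cons q rest ih =>
      obtain ⟨a, b⟩ := q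
      rw [List.cons_append, PySem.Dict.get?_mk_cons]
      simp only [List.any_cons, Bool.or_eq_false_iff] at h
      simp [h.1, ih h.2]

theorem map_replace_fresh (items : List (String × List (String × String × String)))
    (k : String) (x : String × List (String × String × String))
    (h : (items.any fun kv => kv.1 == k) = false) :
    (items.map fun q => if q.1 = k then x else q) = items := by
  conv_rhs => rw [← List.map_id items]
  apply List.map_congr_left
  intro q hqmem
  have hq : ¬ q.1 = k := by
    rw [List.any_eq_false] at h; simpa using h q hqmem
  simp [hq]

-- A's "setdefault then append" step is one modify step.
theorem step_eq_modify (d : PySem.Dict String (List (String × String × String)))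
    (p : String × String × String) :
    ((if d.contains p.1 then d else d.insert p.1 []).modify p.1 [] (fun v => v ++ [p]))
      = d.modify p.1 [] (fun v => v ++ [p]) := by
  by_cases h : d.contains p.1 = true
  · simp [h]
  · simp only [Bool.not_eq_true] at h
    obtain ⟨items⟩ := d
    have hany : (items.any fun kv => kv.1 == p.1) = false := by
      simpa [PySem.Dict.contains] using h
    have h' : (PySem.Dict.mk items).contains p.1 = false := h
    simp only [h', if_neg Bool.false_ne_true]
    have hins : (PySem.Dict.mk items).insert p.1 [] = PySem.Dict.mk (items ++ [(p.1, [])]) := by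
      simp [PySem.Dict.insert, PySem.Dict.contains, hany]
    rw [hins]
    have hc2 : (PySem.Dict.mk (items ++ [(p.1, [])])).contains p.1 = true := by
      simp [PySem.Dict.contains]
    have hg2 : (PySem.Dict.mk (items ++ [(p.1, [])])).getD p.1 [] = [] := by
      rw [PySem.Dict.getD_eq_get?_getD, get?_append_fresh items p.1 [] hany]; rfl
    have hg1 : (PySem.Dict.mk items).getD p.1 [] = [] := by
      rw [PySem.Dict.getD_eq_get?_getD, lookup_none_of_fresh items p.1 hany]; rfl
    apply PySem.Dict.ext
    simp only [PySem.Dict.modify, hg2, hg1]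
    simp [PySem.Dict.items_insert, hc2, h', List.map_append, map_replace_fresh items p.1 _ hany]

-- A's dict fold, characterised: keys are the deduped subjects, each value the filter.
theorem portA_items (ps : List (String × String × String)) :
    (ps.foldl (fun d p => d.modify p.1 [] (fun v => v ++ [p])) PySem.Dict.empty).items
      = (PySem.List.dedup (ps.map (·.1))).map
          (fun s => (s, ps.filter (fun p => p.1 == s))) := by
  set F := ps.foldl (fun d p => d.modify p.1 [] (fun v => v ++ [p])) PySem.Dict.empty with hF
  have hfold : F = (ps.map (fun p => (p.1, p))).foldl
      (fun d q => d.modify q.1 [] (fun v => v ++ [q.2])) PySem.Dict.empty := by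
    rw [List.foldl_map]
  have hnd : F.keys.Nodup := by
    rw [hF]
    exact PySem.Dict.nodup_keys_foldl_modify_key ps (·.1) [] (fun d p v => v ++ [p])
      PySem.Dict.empty (by simp)
  have hkeys : F.keys = PySem.List.dedup (ps.map (·.1)) := by
    rw [hF, PySem.Dict.keys_foldl_modify_key, PySem.Dict.keys_empty,
      PySem.Set.update_nil_left, ← PySem.List.dedup_eq_ofList]
  have hget : ∀ s, F.getD s [] = ps.filter (fun p => p.1 == s) := by
    intro s
    rw [hfold, PySem.Dict.getD_foldl_modify_append, PySem.Dict.getD_empty]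
    simp [Function.comp_def, List.filter_map]
  calc F.items = F.keys.map (fun k => (k, F.getD k [])) :=
        PySem.Dict.items_eq_map_keys F hnd []
    _ = (PySem.List.dedup (ps.map (·.1))).map (fun s => (s, ps.filter (fun p => p.1 == s))) := by
        rw [hkeys]; exact List.map_congr_left (fun s _ => by rw [hget s])

-- ===== VERDICT (by name: the statement is the Claim_ definition above) =====
theorem convert_triples_to_dict_spec : Claim_equal_convert_triples_to_dict := by
  intro triples _ _
  unfold Spec_convert_triples_to_dict convert_triples_to_dict convert_triples_to_dict_alt
  have h1 : triples.foldl
      (fun result triple =>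
        match parse_triple? triple with
        | some p =>
            let result := if result.contains p.1 then result else result.insert p.1 []
            result.modify p.1 [] (fun v => v ++ [p])
        | none => result)
      PySem.Dict.empty
    = (triples.filterMap parse_triple?).foldl
        (fun d p => d.modify p.1 [] (fun v => v ++ [p])) PySem.Dict.empty := by
    rw [List.foldl_filterMap]
    apply PySem.List.foldl_congr_mem
    intro d t _
    cases parse_triple? t with
    | none => rfl
    | some p =>
        show ((if d.contains p.1 then d else d.insert p.1 []).modify p.1 [] fun v => v ++ [p])
          = d.modify p.1 [] fun v => v ++ [p]
        exact step_eq_modify d p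
  rw [h1, portA_items]
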